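-- pv_equiv track=rewrite | github.com/varped/ConnectN-in-Python | main.py | win_horz
-- ===== SOURCE A (Python) =====
-- def win_horz(board, player, num_of_pieces) -> bool:
--     """
--     This function checks if the user won horizontally.
--     :param board: list
--     :param player: int
--     :param num_of_pieces: int
--     :return: bool
--     """
--     for row in board:
--         count = 0
--         for space in row:
--             if space == player:
--                 count += 1
--                 if count == num_of_pieces:
--                     return True
--             else:
--                 count = 0
--     return False
-- ===== SOURCE B (Python) =====
-- def win_horz(board, player, num_of_pieces) -> bool:
--     """Sliding-window re-implementation: a horizontal win is a window of
--     num_of_pieces consecutive cells all equal to player in some row."""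
--     if num_of_pieces < 1:
--         return False
--     for row in board:
--         if num_of_pieces <= len(row):
--             target = [player] * num_of_pieces
--             if any(row[i:i + num_of_pieces] == target
--                    for i in range(len(row) - num_of_pieces + 1)):
--                 return True
--     return False
-- ===== Notes on version B (the rewrite author's own statement) =====
-- stated objective: alternative
-- what changed: Replaces the running consecutive-counter scan with a declarative sliding-window check: after a natural positivity guard, B compares each length-n slice of each row against [player]*n via any().
import Mathlib
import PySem

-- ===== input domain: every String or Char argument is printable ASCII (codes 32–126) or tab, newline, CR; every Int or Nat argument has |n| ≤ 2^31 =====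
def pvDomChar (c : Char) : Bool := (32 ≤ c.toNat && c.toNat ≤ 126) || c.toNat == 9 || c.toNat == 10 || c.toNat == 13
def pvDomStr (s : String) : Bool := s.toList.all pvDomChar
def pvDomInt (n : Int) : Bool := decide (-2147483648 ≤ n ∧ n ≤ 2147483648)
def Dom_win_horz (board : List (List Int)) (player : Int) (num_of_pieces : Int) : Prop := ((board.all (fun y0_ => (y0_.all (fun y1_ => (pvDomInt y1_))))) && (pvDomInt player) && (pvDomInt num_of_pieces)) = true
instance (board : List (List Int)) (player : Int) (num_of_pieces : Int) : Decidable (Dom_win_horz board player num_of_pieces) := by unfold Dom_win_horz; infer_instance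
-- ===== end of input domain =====

-- B replaces A's running consecutive-counter with a declarative sliding-window check
-- (any length-n slice of a row equal to [player]*n), behind a natural positivity guard.

-- ===== PORT A =====
-- inner loop of A: scan a row keeping the running count of consecutive player cells
def winRowA (player num_of_pieces : Int) : List Int → Int → Bool
  | [], _ => false
  | space :: rest, count =>
    if space = player then
      (if count + 1 = num_of_pieces then true else winRowA player num_of_pieces rest (count + 1))
    else winRowA player num_of_pieces rest 0

def win_horz (board : List (List Int)) (player : Int) (num_of_pieces : Int) : Bool :=
  board.any (fun row => winRowA player num_of_pieces row 0)

-- ===== PORT B =====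
def win_horz_alt (board : List (List Int)) (player : Int) (num_of_pieces : Int) : Bool :=
  if num_of_pieces < 1 then false
  else
    board.any (fun row =>
      if num_of_pieces ≤ (row.length : Int) then
        (PySem.List.pyRange 0 ((row.length : Int) - num_of_pieces + 1) 1).any (fun i =>
          PySem.List.slice row (some i) (some (i + num_of_pieces)) ==
            List.replicate num_of_pieces.toNat player)
      else false)

-- ===== PRECONDITION & SPEC =====
def Spec_win_horz (board : List (List Int)) (player : Int) (num_of_pieces : Int) (out : Bool) : Prop := out = win_horz_alt board player num_of_pieces
instance (board : List (List Int)) (player : Int) (num_of_pieces : Int) (out : Bool) : Decidable (Spec_win_horz board player num_of_pieces out) := by unfold Spec_win_horz; infer_instance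

-- ===== CLAIM (what is proved, stated in full; the proofs are below) =====
def Claim_equal_win_horz : Prop := ∀ (board : List (List Int)) (player : Int) (num_of_pieces : Int), Dom_win_horz board player num_of_pieces → Spec_win_horz board player num_of_pieces (win_horz board player num_of_pieces)

-- ===== LEMMAS AND PROOFS =====

-- when num_of_pieces ≤ 0, the counter (kept ≥ 0) can never hit it: A returns False
lemma winRowA_nonpos (player n : Int) (hn : n ≤ 0) :
    ∀ (row : List Int) (c : Int), 0 ≤ c → winRowA player n row c = false := by
  intro row
  induction row with
  | nil => intro c _; rfl
  | cons s rest ih =>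
    intro c hc
    by_cases hs : s = player
    · have hne : ¬ (c + 1 = n) := by omega
      simp [winRowA, hs, hne, ih (c + 1) (by omega)]
    · simp [winRowA, hs, ih 0 le_rfl]

-- replicate prefixes of longer replicates
lemma replicate_prefix_replicate (p : Int) {k m : Nat} (h : k ≤ m) :
    List.replicate k p <+: List.replicate m p := by
  refine ⟨List.replicate (m - k) p, ?_⟩
  rw [← List.replicate_add]
  congr 1
  omega

lemma replicate_succ_prefix_cons (p a : Int) (k : Nat) (l : List Int) :
    (List.replicate (k + 1) p <+: a :: l) ↔ (a = p ∧ List.replicate k p <+: l) := by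
  constructor
  · intro h
    rw [List.replicate_succ, List.cons_prefix_cons] at h
    exact ⟨h.1.symm, h.2⟩
  · intro ⟨h1, h2⟩
    rw [List.replicate_succ, List.cons_prefix_cons]
    exact ⟨h1.symm, h2⟩

lemma replicate_infix_cons (p a : Int) (k : Nat) (l : List Int) :
    (List.replicate (k + 1) p <:+: a :: l) ↔
      ((a = p ∧ List.replicate k p <+: l) ∨ List.replicate (k + 1) p <:+: l) := by
  rw [List.infix_cons_iff, replicate_succ_prefix_cons]

-- an infix occurrence is exactly a window: drop/take
lemma infix_iff_window (t l : List Int) :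
    t <:+: l ↔ ∃ k : Nat, k ≤ l.length ∧ (l.drop k).take t.length = t := by
  constructor
  · rintro ⟨s, u, rfl⟩
    refine ⟨s.length, by simp, ?_⟩
    rw [List.append_assoc, List.drop_left' rfl, List.take_left' rfl]
  · rintro ⟨k, _, h⟩
    rw [← h]
    exact ((List.take_prefix t.length (l.drop k)).isInfix).trans (List.drop_suffix k l).isInfix

-- A's row scan with credit c finds a win iff the remaining (n-c) prefix is all player,
-- or a full run of n players occurs somewhere in the row
lemma winRowA_iff (player n : Int) (hn : 1 ≤ n) :
    ∀ (row : List Int) (c : Int), 0 ≤ c → c < n →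
      (winRowA player n row c = true ↔
        (List.replicate (n - c).toNat player <+: row ∨
         (List.replicate n.toNat player) <:+: row)) := by
  intro row
  induction row with
  | nil =>
    intro c hc hcn
    have h1 : (n - c).toNat = (n - c - 1).toNat + 1 := by omega
    have h2 : n.toNat = (n - 1).toNat + 1 := by omega
    rw [show winRowA player n [] c = false from rfl, h1, h2, List.replicate_succ,
       List.replicate_succ]
    simp
  | cons s rest ih =>
    intro c hc hcn
    have h1 : (n - c).toNat = (n - c - 1).toNat + 1 := by omega
    have h2 : n.toNat = (n - 1).toNat + 1 := by omega
    have hprefix : (List.replicate (n - c).toNat player <+: s :: rest) ↔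
        (s = player ∧ List.replicate (n - c - 1).toNat player <+: rest) := by
      rw [h1, replicate_succ_prefix_cons]
    have hinfix : (List.replicate n.toNat player <:+: s :: rest) ↔
        ((s = player ∧ List.replicate (n - 1).toNat player <+: rest) ∨
         List.replicate n.toNat player <:+: rest) := by
      conv_lhs => rw [h2]
      rw [replicate_infix_cons, ← h2]
    have hstep : winRowA player n (s :: rest) c =
        (if s = player then (if c + 1 = n then true else winRowA player n rest (c + 1))
         else winRowA player n rest 0) := rfl
    rw [hprefix, hinfix]
    by_cases hs : s = player
    · by_cases heq : c + 1 = n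
      · have hz : (n - c - 1).toNat = 0 := by omega
        rw [hstep, if_pos hs, if_pos heq]
        simp only [hz, List.replicate_zero, true_iff]
        exact Or.inl ⟨hs, List.nil_prefix⟩
      · rw [hstep, if_pos hs, if_neg heq, ih (c + 1) (by omega) (by omega),
            show (n - (c + 1)).toNat = (n - c - 1).toNat by omega]
        constructor
        · rintro (h | h)
          · exact Or.inl ⟨hs, h⟩
          · exact Or.inr (Or.inr h)
        · rintro (⟨_, h⟩ | ⟨_, h⟩ | h)
          · exact Or.inl h
          · exact Or.inl ((replicate_prefix_replicate player (by omega)).trans h)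
          · exact Or.inr h
    · rw [hstep, if_neg hs, ih 0 le_rfl (by omega),
          show (n - 0).toNat = n.toNat by omega]
      constructor
      · rintro (h | h)
        · exact Or.inr (Or.inr h.isInfix)
        · exact Or.inr (Or.inr h)
      · rintro (⟨h, _⟩ | ⟨h, _⟩ | h)
        · exact (hs h).elim
        · exact (hs h).elim
        · exact Or.inr h

-- B's window scan over a row finds the same infix occurrence
lemma altRow_iff (player n : Int) (hn : 1 ≤ n) (row : List Int) :
    ((if n ≤ (row.length : Int) then
        (PySem.List.pyRange 0 ((row.length : Int) - n + 1) 1).any (fun i =>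
          PySem.List.slice row (some i) (some (i + n)) == List.replicate n.toNat player)
      else false) = true ↔
      (List.replicate n.toNat player) <:+: row) := by
  have hncast : ((n.toNat : Nat) : Int) = n := Int.toNat_of_nonneg (by omega)
  by_cases hfits : n ≤ (row.length : Int)
  case neg =>
    rw [if_neg hfits]
    refine iff_of_false (by simp) ?_
    intro hinf
    have hlen := hinf.length_le
    rw [List.length_replicate] at hlen
    omega
  rw [if_pos hfits, List.any_eq_true, infix_iff_window]
  simp only [List.length_replicate]
  constructor
  · rintro ⟨i, hi, hslice⟩
    rw [PySem.List.mem_pyRange_one] at hi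
    obtain ⟨hi0, hiub⟩ := hi
    have hcast : ((i.toNat : Nat) : Int) = i := Int.toNat_of_nonneg hi0
    refine ⟨i.toNat, by omega, ?_⟩
    rw [← hcast, ← hncast] at hslice
    rw [PySem.List.slice_natCast_add] at hslice
    simp only [Int.toNat_natCast] at hslice
    exact eq_of_beq hslice
  · rintro ⟨k, hk, hwin⟩
    have hfit : k + n.toNat ≤ row.length := by
      have := congrArg List.length hwin
      simp at this
      omega
    refine ⟨(k : Int), ?_, ?_⟩
    · rw [PySem.List.mem_pyRange_one]
      exact ⟨Int.natCast_nonneg k, by omega⟩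
    · rw [← hncast, PySem.List.slice_natCast_add]
      simp only [Int.toNat_natCast]
      exact beq_iff_eq.mpr hwin

-- ===== VERDICT (by name: the statement is the Claim_ definition above) =====
theorem win_horz_spec : Claim_equal_win_horz := by
  intro board player n _
  unfold Spec_win_horz win_horz win_horz_alt
  by_cases hn : n < 1
  · simp only [if_pos hn]
    rw [List.any_eq_false]
    intro row _
    simp [winRowA_nonpos player n (by omega) row 0 le_rfl]
  · have hn1 : 1 ≤ n := by omega
    simp only [if_neg hn]
    apply Bool.eq_iff_iff.mpr
    rw [List.any_eq_true, List.any_eq_true]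
    constructor
    · rintro ⟨row, hmem, hrow⟩
      refine ⟨row, hmem, ?_⟩
      rw [altRow_iff player n hn1 row]
      rcases (winRowA_iff player n hn1 row 0 le_rfl (by omega)).mp hrow with h | h
      · rw [show (n - 0).toNat = n.toNat by omega] at h
        exact h.isInfix
      · exact h
    · rintro ⟨row, hmem, hrow⟩
      refine ⟨row, hmem, ?_⟩
      rw [winRowA_iff player n hn1 row 0 le_rfl (by omega)]
      exact Or.inr ((altRow_iff player n hn1 row).mp hrow)
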